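-- pv_equiv track=rewrite | github.com/darkeclipz/code-collection | find_permutation_at_index.py | find_permutation_at_index
-- ===== SOURCE A (Python) =====
-- def find_permutation_at_index(S, index):
--     factorial = [1,1]
--     for i in range(2, len(S)):
--         factorial.append(i*factorial[i-1])
--     R = []
--     remainder = index
--     while remainder > 0:
--         n = len(S)-1
--         index = remainder // factorial[n]
--         remainder -= index * factorial[n]
--         R.append(S[index])
--         del S[index]
--     return R + S
-- ===== SOURCE B (Python) =====
-- def find_permutation_at_index(S, index):
--     # Two-phase unranking: one divmod chain (factorial number system, low digit
--     # first) computes all selection digits, then one selection pass pops them.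
--     # Return-value equivalence only: A empties/mutates S in place, B does not.
--     if index <= 0:
--         return list(S)
--     digits = []
--     r = index
--     for b in range(1, len(S) + 1):
--         r, d = divmod(r, b)
--         digits.append(d)
--     rest = list(S)
--     return [rest.pop(d) for d in reversed(digits)]
-- ===== Notes on version B (the rewrite author's own statement) =====
-- stated objective: alternative
-- what changed: Replaced A's precomputed-factorial table plus while-loop dividing the remainder by large factorials with a two-phase unranking: a single divmod chain by the small bases 1..n extracts all factorial-number-system digits at once, then one selection pass pops each digit from the remaining elements.
import Mathlib
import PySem

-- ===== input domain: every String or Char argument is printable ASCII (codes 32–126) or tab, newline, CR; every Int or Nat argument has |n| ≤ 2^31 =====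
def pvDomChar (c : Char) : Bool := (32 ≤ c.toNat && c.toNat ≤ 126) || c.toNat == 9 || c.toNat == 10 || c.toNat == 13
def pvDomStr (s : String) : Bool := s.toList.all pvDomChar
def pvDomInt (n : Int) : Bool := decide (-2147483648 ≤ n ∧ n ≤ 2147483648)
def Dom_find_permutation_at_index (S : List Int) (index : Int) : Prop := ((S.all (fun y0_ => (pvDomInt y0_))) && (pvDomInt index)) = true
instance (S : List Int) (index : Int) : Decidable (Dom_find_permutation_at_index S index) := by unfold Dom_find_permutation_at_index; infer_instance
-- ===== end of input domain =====

-- B replaces A's factorial table + while-loop of big divisions by a divmod chain over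
-- the small bases 1..n followed by one selection pass (a different decomposition of unranking).
-- Equivalence is about the RETURN value only: Python A mutates S in place, B does not.

-- ===== PORT A =====
-- the while-loop of A: each iteration divides by factorial[len(S)-1] and deletes S[index]
def faLoop (fact : List Int) (S R : List Int) (remainder : Int) : List Int :=
  if remainder > 0 then
    let n : Int := (S.length : Int) - 1
    let f := PySem.List.pyGetD fact n 0
    let idx := PySem.Int.floordiv remainder f
    match h : PySem.List.pop? S idx with
    | none => R ++ S  -- IndexError in Python (excluded by Pre_)
    | some p => faLoop fact p.2 (R ++ [p.1]) (remainder - idx * f)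
  else R ++ S
termination_by S.length
decreasing_by
  have := PySem.List.length_of_pop?_eq_some (h := h)
  omega

def find_permutation_at_index (S : List Int) (index : Int) : List Int :=
  let fact := (PySem.List.pyRange 2 (S.length : Int) 1).foldl
      (fun f i => f ++ [i * PySem.List.pyGetD f (i - 1) 0]) [1, 1]
  faLoop fact S [] index

-- ===== PORT B =====
-- the comprehension [rest.pop(d) for d in reversed(digits)]
def fbSelect : List Int → List Int → List Int
  | _, [] => []
  | rest, d :: ds =>
    match PySem.List.pop? rest d with
    | none => []  -- IndexError in Python (excluded by Pre_)
    | some p => p.1 :: fbSelect p.2 ds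

def find_permutation_at_index_alt (S : List Int) (index : Int) : List Int :=
  if index ≤ 0 then S
  else
    -- r, d = divmod(r, b) for b in range(1, len(S)+1), collecting the digits d
    let rd := (PySem.List.pyRange 1 ((S.length : Int) + 1) 1).foldl
        (fun p b => (PySem.Int.floordiv p.1 b, p.2 ++ [PySem.Int.mod p.1 b]))
        (index, ([] : List Int))
    fbSelect S rd.2.reverse

-- ===== PRECONDITION & SPEC =====
-- Pre_ excludes exactly index ≥ len(S)!, where Python A raises IndexError (S[index] past the end;
-- Python B returns the permutation at index mod len(S)! there instead).
def Pre_find_permutation_at_index (S : List Int) (index : Int) : Prop :=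
  index < (Nat.factorial S.length : Int)
instance (S : List Int) (index : Int) : Decidable (Pre_find_permutation_at_index S index) := by
  unfold Pre_find_permutation_at_index; infer_instance

def pvWitness_find_permutation_at_index : List Int × Int := ([1, 2, 3], 4)

def Spec_find_permutation_at_index (S : List Int) (index : Int) (out : List Int) : Prop :=
  out = find_permutation_at_index_alt S index
instance (S : List Int) (index : Int) (out : List Int) : Decidable (Spec_find_permutation_at_index S index out) := by
  unfold Spec_find_permutation_at_index; infer_instance

-- ===== CLAIM (what is proved, stated in full; the proofs are below) =====
def Claim_equal_find_permutation_at_index : Prop := ∀ (S : List Int) (index : Int), Dom_find_permutation_at_index S index → Pre_find_permutation_at_index S index → Spec_find_permutation_at_index S index (find_permutation_at_index S index)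


-- ===== LEMMAS AND PROOFS =====

-- common mathematical skeleton: pick the (r / m!)-th remaining element, recurse on r % m!
def unrank : Nat → List Int → Nat → List Int
  | 0, T, _ => T
  | m + 1, T, r =>
    if r = 0 then T else
    match PySem.List.pop? T ((r / Nat.factorial m : Nat) : Int) with
    | none => T
    | some p => p.1 :: unrank m p.2 (r % Nat.factorial m)

lemma unrank_zero (m : Nat) (T : List Int) : unrank m T 0 = T := by
  cases m <;> simp [unrank]

def factL (m : Nat) : List Int := (List.range (max 2 m)).map (fun k => (Nat.factorial k : Int))

lemma factL_getD (m k : Nat) (h : k < max 2 m) :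
    (factL m).getD k 0 = (Nat.factorial k : Int) := by
  simp [factL, List.getD_eq_getElem?_getD, h]

lemma fact_fold (m : Nat) :
    (PySem.List.pyRange 2 (m : Int) 1).foldl
      (fun f i => f ++ [i * PySem.List.pyGetD f (i - 1) 0]) [1, 1] = factL m := by
  induction m with
  | zero => decide
  | succ m ih =>
    by_cases h2 : m < 2
    · interval_cases m <;> decide
    · have hsplit : PySem.List.pyRange 2 ((m : Int) + 1) 1
          = PySem.List.pyRange 2 (m : Int) 1 ++ [(m : Int)] :=
        PySem.List.pyRange_one_succ_right (by omega)
      push_cast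
      rw [hsplit, List.foldl_append, ih]
      have hm1 : (m : Int) - 1 = ((m - 1 : Nat) : Int) := by omega
      rw [List.foldl_cons, List.foldl_nil, hm1, PySem.List.pyGetD_natCast,
          factL_getD m (m - 1) (by omega)]
      have hfac : (m : Int) * ((Nat.factorial (m - 1) : Nat) : Int) = (Nat.factorial m : Int) := by
        have h : m * Nat.factorial (m - 1) = Nat.factorial m := by
          conv_rhs => rw [show m = (m - 1) + 1 by omega]
          rw [Nat.factorial_succ]; congr 1; omega
        exact_mod_cast h
      rw [hfac]
      simp [factL, show max 2 (m + 1) = m + 1 by omega, show max 2 m = m by omega,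
            List.range_succ]

lemma faLoop_eq (m₀ : Nat) : ∀ (n : Nat) (T R : List Int) (r : Int), T.length = n → n ≤ m₀ →
    0 ≤ r → r.toNat < Nat.factorial n →
    faLoop (factL m₀) T R r = R ++ unrank n T r.toNat := by
  intro n
  induction n with
  | zero =>
    intro T R r hT _ h0 hr
    rw [List.length_eq_zero_iff] at hT
    subst hT
    have : ¬ r > 0 := by simp [Nat.factorial] at hr; omega
    rw [faLoop, if_neg this]
    rfl
  | succ m ih =>
    intro T R r hT hm h0 hr
    by_cases hpos : r > 0
    · have hfpos : 0 < Nat.factorial m := Nat.factorial_pos m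
      have hn : (T.length : Int) - 1 = ((m : Nat) : Int) := by omega
      have hgd : PySem.List.pyGetD (factL m₀) ((m : Nat) : Int) 0 = (Nat.factorial m : Int) := by
        rw [PySem.List.pyGetD_natCast, factL_getD m₀ m (by omega)]
      have hrn : r = ((r.toNat : Nat) : Int) := by omega
      have hfd : PySem.Int.floordiv r (Nat.factorial m : Int)
          = ((r.toNat / Nat.factorial m : Nat) : Int) := by
        conv_lhs => rw [hrn]
        rw [PySem.Int.floordiv_natCast]
      set d := r.toNat / Nat.factorial m with hd
      have hdlt : d < T.length := by
        rw [hT]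
        rw [hd, Nat.div_lt_iff_lt_mul hfpos]
        calc r.toNat < Nat.factorial (m + 1) := hr
          _ = (m + 1) * Nat.factorial m := Nat.factorial_succ m
      have hpop : PySem.List.pop? T ((d : Nat) : Int)
          = some (T[d], T.eraseIdx d) := PySem.List.pop?_natCast T _ hdlt
      have h2 : d * Nat.factorial m + r.toNat % Nat.factorial m = r.toNat := by
        rw [hd]; exact Nat.div_add_mod' r.toNat (Nat.factorial m)
      have h3 : ((d : Nat) : Int) * ((Nat.factorial m : Nat) : Int)
          = ((d * Nat.factorial m : Nat) : Int) := by push_cast; ring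
      have hrem : r - ((d : Nat) : Int) * (Nat.factorial m : Int)
          = ((r.toNat % Nat.factorial m : Nat) : Int) := by
        rw [h3]; omega
      have hlen' : (T.eraseIdx d).length = m := by
        rw [List.length_eraseIdx_of_lt hdlt]; omega
      have hrec := ih (T.eraseIdx d) (R ++ [T[d]]) ((r.toNat % Nat.factorial m : Nat) : Int)
          hlen' (by omega) (Int.natCast_nonneg _) (by rw [Int.toNat_natCast]; exact Nat.mod_lt _ hfpos)
      simp only [Int.toNat_natCast] at hrec
      have hu : unrank (m + 1) T r.toNat
          = T[d] :: unrank m (T.eraseIdx d) (r.toNat % Nat.factorial m) := by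
        rw [unrank, if_neg (by omega), hpop]
      rw [faLoop, if_pos hpos]
      dsimp only
      split
      · rename_i heq
        rw [hn, hgd, hfd, hpop] at heq
        exact absurd heq (by simp)
      · rename_i p heq
        rw [hn, hgd, hfd, hpop] at heq
        injection heq with heq
        subst heq
        rw [hn, hgd, hfd, hrem, hrec, hu, List.append_assoc, List.singleton_append]
    · have hr0 : r = 0 := by omega
      subst hr0
      rw [faLoop, if_neg hpos]
      rw [show (0:Int).toNat = 0 from rfl, unrank, if_pos rfl]

def digitsN : Nat → Nat → List Int
  | 0, _ => []
  | m + 1, r => digitsN m r ++ [((r / Nat.factorial m % (m + 1) : Nat) : Int)]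

lemma digits_fold (m r : Nat) :
    (PySem.List.pyRange 1 ((m : Int) + 1) 1).foldl
      (fun p b => (PySem.Int.floordiv p.1 b, p.2 ++ [PySem.Int.mod p.1 b]))
      ((r : Int), ([] : List Int))
    = (((r / Nat.factorial m : Nat) : Int), digitsN m r) := by
  induction m with
  | zero => simp [digitsN]
  | succ m ih =>
    have hsplit : PySem.List.pyRange 1 (((m + 1 : Nat) : Int) + 1) 1
        = PySem.List.pyRange 1 ((m : Int) + 1) 1 ++ [((m + 1 : Nat) : Int)] := by
      push_cast
      exact PySem.List.pyRange_one_succ_right (by omega)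
    rw [hsplit, List.foldl_append, ih, List.foldl_cons, List.foldl_nil]
    have hdiv : PySem.Int.floordiv ((r / Nat.factorial m : Nat) : Int) ((m + 1 : Nat) : Int)
        = ((r / Nat.factorial (m + 1) : Nat) : Int) := by
      rw [PySem.Int.floordiv_natCast]
      congr 1
      rw [Nat.div_div_eq_div_mul]
      congr 1
      rw [Nat.factorial_succ]; ring
    have hmod : PySem.Int.mod ((r / Nat.factorial m : Nat) : Int) ((m + 1 : Nat) : Int)
        = ((r / Nat.factorial m % (m + 1) : Nat) : Int) := by
      rw [PySem.Int.mod_natCast]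
    rw [hdiv, hmod]
    simp [digitsN]

lemma digits_mod (m r : Nat) : digitsN m (r % Nat.factorial m) = digitsN m r := by
  induction m generalizing r with
  | zero => rfl
  | succ m ih =>
    have hfs : Nat.factorial (m + 1) = Nat.factorial m * (m + 1) := by
      rw [Nat.factorial_succ]; ring
    have hdvd : Nat.factorial m ∣ Nat.factorial (m + 1) :=
      Nat.factorial_dvd_factorial (Nat.le_succ m)
    have hentry : r % Nat.factorial (m + 1) / Nat.factorial m = r / Nat.factorial m % (m + 1) := by
      rw [hfs]; exact Nat.mod_mul_right_div_self r (Nat.factorial m) (m + 1)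
    have hpre : digitsN m (r % Nat.factorial (m + 1)) = digitsN m r := by
      have h1 := ih (r % Nat.factorial (m + 1))
      rw [Nat.mod_mod_of_dvd r hdvd] at h1
      rw [← h1, ih r]
    simp [digitsN, hpre, hentry, Nat.mod_mod_of_dvd]

lemma select_eq (m : Nat) : ∀ (T : List Int) (r : Nat), T.length = m → r < Nat.factorial m →
    fbSelect T (digitsN m r).reverse = unrank m T r := by
  induction m with
  | zero =>
    intro T r hT _
    rw [List.length_eq_zero_iff] at hT
    subst hT
    rfl
  | succ m ih =>
    intro T r hT hr
    have hfpos : 0 < Nat.factorial m := Nat.factorial_pos m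
    have hd : r / Nat.factorial m < m + 1 := by
      rw [Nat.div_lt_iff_lt_mul hfpos]
      calc r < Nat.factorial (m + 1) := hr
        _ = (m + 1) * Nat.factorial m := Nat.factorial_succ m
    have hmod : r / Nat.factorial m % (m + 1) = r / Nat.factorial m := Nat.mod_eq_of_lt hd
    have hdlt : r / Nat.factorial m < T.length := by omega
    have hpop : PySem.List.pop? T ((r / Nat.factorial m : Nat) : Int)
        = some (T[r / Nat.factorial m], T.eraseIdx (r / Nat.factorial m)) :=
      PySem.List.pop?_natCast T _ hdlt
    have hlen' : (T.eraseIdx (r / Nat.factorial m)).length = m := by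
      rw [List.length_eraseIdx_of_lt hdlt]; omega
    have hrec := ih (T.eraseIdx (r / Nat.factorial m)) (r % Nat.factorial m) hlen'
        (Nat.mod_lt _ hfpos)
    rw [digits_mod] at hrec
    simp only [digitsN, List.reverse_append, List.reverse_singleton, List.singleton_append,
      hmod]
    rw [fbSelect, hpop]
    by_cases hr0 : r = 0
    · subst hr0
      simp only [Nat.zero_div, Nat.zero_mod] at hpop hrec ⊢
      rw [hrec, unrank_zero, unrank_zero]
      cases T with
      | nil => simp at hdlt
      | cons a ts => simp [List.eraseIdx]
    · rw [unrank, if_neg hr0, hpop]; simp [hrec]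

-- ===== VERDICT (by name: the statement is the Claim_ definition above) =====
theorem find_permutation_at_index_spec : Claim_equal_find_permutation_at_index := by
  intro S index hDom hPre
  unfold Spec_find_permutation_at_index
  unfold Pre_find_permutation_at_index at hPre
  unfold find_permutation_at_index find_permutation_at_index_alt
  dsimp only
  by_cases h : index ≤ 0
  · rw [if_pos h, faLoop, if_neg (by omega : ¬ index > 0)]
    simp
  · rw [if_neg h]
    rw [fact_fold S.length]
    rw [faLoop_eq S.length S.length S [] index rfl le_rfl (by omega) (by omega)]
    have hrn : index = ((index.toNat : Nat) : Int) := by omega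
    conv_rhs => rw [hrn]
    rw [digits_fold S.length index.toNat]
    rw [select_eq S.length S index.toNat rfl (by omega)]
    simp
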